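-- pv_equiv track=rewrite | github.com/pastukhov/mnemos | services/user_import_service.py | clean_block
-- ===== SOURCE A (Python) =====
-- def clean_block(block: str) -> str:
--   lines = [line.strip() for line in block.splitlines()]
--   cleaned_lines = []
--   for line in lines:
--     if not line:
--       continue
--     cleaned_lines.append(line.removeprefix("- ").removeprefix("* ").strip())
--   return compact_text("\n".join(cleaned_lines))
--
-- def compact_text(value: str) -> str:
--   return " ".join(segment for segment in value.replace("\n", " ").split() if segment).strip()
-- ===== SOURCE B (Python) =====
-- def clean_block(block: str) -> str:
--   # Single-pass index scanner: walks the raw string with two pointers, never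
--   # building intermediate line/cleaned-line strings; prefix removal and
--   # whitespace collapsing are done on index arithmetic over the original block.
--   out = []
--   n = len(block)
--   i = 0
--   while i < n:
--     # locate end of current line
--     j = i
--     while j < n and block[j] != '\n' and block[j] != '\r':
--       j += 1
--     # strip [i, j) to [a, b)
--     a = i
--     while a < j and (block[a] == ' ' or block[a] == '\t'):
--       a += 1
--     b = j
--     while b > a and (block[b - 1] == ' ' or block[b - 1] == '\t'):
--       b -= 1
--     # bullet-prefix removal, directly on indices
--     if b - a >= 2 and block[a] == '-' and block[a + 1] == ' ':
--       a += 2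
--     if b - a >= 2 and block[a] == '*' and block[a + 1] == ' ':
--       a += 2
--     # emit the word tokens of [a, b)
--     k = a
--     while k < b:
--       if block[k] == ' ' or block[k] == '\t':
--         k += 1
--       else:
--         m = k
--         while m < b and block[m] != ' ' and block[m] != '\t':
--           m += 1
--         out.append(block[k:m])
--         k = m
--     i = j + 1 if j < n else j
--   return ' '.join(out)
-- ===== Notes on version B (the rewrite author's own statement) =====
-- stated objective: alternative
-- what changed: Replaces A's staged string pipeline (splitlines, per-line strip/removeprefix into a cleaned-lines list, '\n'.join, then a global replace/re-split/re-join in compact_text) with a single-pass two-pointer index scanner over the raw block that locates line bounds, strips and removes bullet prefixes purely by index arithmetic, and emits word tokens directly without building any intermediate strings.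
import Mathlib
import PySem

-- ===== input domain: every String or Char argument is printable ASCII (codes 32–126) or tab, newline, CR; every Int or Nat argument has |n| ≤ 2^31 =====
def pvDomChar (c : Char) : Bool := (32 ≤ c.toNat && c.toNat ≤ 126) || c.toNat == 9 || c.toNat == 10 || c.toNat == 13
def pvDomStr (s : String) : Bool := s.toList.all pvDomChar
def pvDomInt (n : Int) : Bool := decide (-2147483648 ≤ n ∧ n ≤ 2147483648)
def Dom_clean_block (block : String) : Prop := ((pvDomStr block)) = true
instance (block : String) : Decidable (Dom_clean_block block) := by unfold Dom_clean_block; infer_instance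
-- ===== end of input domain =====

-- B replaces A's staged pipeline (splitlines → strip each line → removeprefix → join with
-- newlines → global replace/re-split/re-join in compact_text) by a single-pass two-pointer
-- index scanner over the raw string that emits word tokens directly (objective: alternative;
-- same return value, same asymptotic cost).

-- s.removeprefix(p)  (exact: s[len(p):] if s.startswith(p) else s)
def pvRemoveprefix (s p : List Char) : List Char :=
  if PySem.Chars.startswith s p then s.drop p.length else s

-- ===== PORT A =====
def pvCompactText (v : List Char) : List Char :=
  PySem.Chars.strip
    (PySem.Chars.join [' ']
      ((PySem.Chars.split₀ (PySem.Chars.replace v ['\n'] [' '])).filter (fun seg => !seg.isEmpty)))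

def clean_block (block : String) : String :=
  let lines := (PySem.Chars.splitlines block.toList).map PySem.Chars.strip
  let cleaned_lines := lines.foldl
    (fun acc line =>
      if line.isEmpty then acc
      else acc ++ [PySem.Chars.strip (pvRemoveprefix (pvRemoveprefix line ['-', ' ']) ['*', ' '])]) []
  String.mk (pvCompactText (PySem.Chars.join ['\n'] cleaned_lines))

-- ===== PORT B =====
-- Source B is an index scanner over the block; each of its `while` loops becomes the
-- corresponding recursion that consumes the not-yet-scanned suffix of the characters.

-- the tests  block[x] == ' ' or block[x] == '\t'  of Source B
def bIsWS (c : Char) : Bool := c == ' ' || c == '\t'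

-- inner loop `while j < n and block[j] != '\n' and block[j] != '\r'`: current line / rest after the terminator (i = j + 1)
def bLineSplit : List Char → List Char × List Char
  | [] => ([], [])
  | c :: t => if c == '\n' || c == '\r' then ([], t)
              else let p := bLineSplit t; (c :: p.1, p.2)

lemma bLineSplit_le (l : List Char) : (bLineSplit l).2.length ≤ l.length := by
  induction l with
  | nil => simp [bLineSplit]
  | cons c t ih =>
    simp only [bLineSplit]
    split
    · simp
    · simpa using Nat.le_succ_of_le ih

-- `while m < b and block[m] != ' ' and block[m] != '\t'`: current word / rest
def bWord : List Char → List Char × List Char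
  | [] => ([], [])
  | c :: t => if bIsWS c then ([], c :: t) else let p := bWord t; (c :: p.1, p.2)

lemma bWord_le (l : List Char) : (bWord l).2.length ≤ l.length := by
  induction l with
  | nil => simp [bWord]
  | cons c t ih =>
    simp only [bWord]
    split
    · simp
    · simpa using Nat.le_succ_of_le ih

-- the token loop `while k < b: …` of Source B
def bTok : List Char → List (List Char)
  | [] => []
  | c :: t =>
    if bIsWS c then bTok t
    else (c :: (bWord t).1) :: bTok (bWord t).2
termination_by l => l.length
decreasing_by
  · simp
  · simpa using Nat.lt_succ_of_le (bWord_le t)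

-- the strip loops on indices a / b of Source B
def bLstrip (l : List Char) : List Char := l.dropWhile bIsWS
def bRstrip (l : List Char) : List Char := (l.reverse.dropWhile bIsWS).reverse

-- `if b - a >= 2 and block[a] == m and block[a+1] == ' ': a += 2`
def bDropBullet (m : Char) (l : List Char) : List Char :=
  match l with
  | a :: b :: t => if a == m && b == ' ' then t else a :: b :: t
  | l => l

-- one iteration of Source B's outer loop on the current line [i, j)
def bLine (l : List Char) : List (List Char) :=
  bTok (bDropBullet '*' (bDropBullet '-' (bRstrip (bLstrip l))))

-- the outer `while i < n` loop: tokens accumulated over all lines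
def bGo : List Char → List (List Char)
  | [] => []
  | c :: t => bLine (bLineSplit (c :: t)).1 ++ bGo (bLineSplit (c :: t)).2
termination_by l => l.length
decreasing_by
  simp only [bLineSplit]
  split
  · simp
  · simpa using Nat.lt_succ_of_le (bLineSplit_le t)

def clean_block_alt (block : String) : String :=
  String.mk (PySem.Chars.join [' '] (bGo block.toList))

-- ===== PRECONDITION & SPEC =====
def Spec_clean_block (block : String) (out : String) : Prop := out = clean_block_alt block
instance (block : String) (out : String) : Decidable (Spec_clean_block block out) := by unfold Spec_clean_block; infer_instance

-- ===== CLAIM (what is proved, stated in full; the proofs are below) =====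
def Claim_equal_clean_block : Prop := ∀ (block : String), Dom_clean_block block → Spec_clean_block block (clean_block block)

-- ===== LEMMAS AND PROOFS =====

-- the tokens produced for one raw line: A's  split(strip(line).removeprefix("- ").removeprefix("* "))
def tokA (l : List Char) : List (List Char) :=
  PySem.Chars.split₀
    (pvRemoveprefix (pvRemoveprefix (PySem.Chars.strip l) ['-', ' ']) ['*', ' '])

lemma split0_go_acc (s cur : List Char) (acc : List (List Char)) :
    PySem.Chars.split₀.go s cur acc = acc.reverse ++ PySem.Chars.split₀.go s cur [] := by
  induction s generalizing cur acc with
  | nil => simp [PySem.Chars.split₀.go]; split <;> simp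
  | cons c rest ih =>
    rw [PySem.Chars.split₀.go, PySem.Chars.split₀.go]
    split
    · split
      · exact ih _ _
      · rw [ih _ (_ :: acc), ih _ [_]]; simp
    · exact ih _ _

lemma split0_all_ws (s : List Char) (h : ∀ x ∈ s, PySem.Chars.isspace x = true) :
    PySem.Chars.split₀ s = [] := by
  induction s with
  | nil => rfl
  | cons c rest ih =>
    have hc := h c (by simp)
    show PySem.Chars.split₀.go _ [] [] = []
    rw [PySem.Chars.split₀.go]
    simp only [hc, if_pos, List.isEmpty_nil]
    exact ih (fun x hx => h x (by simp [hx]))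

lemma split0_append_ws (c : Char) (hc : PySem.Chars.isspace c = true) (a b : List Char) :
    PySem.Chars.split₀ (a ++ c :: b) = PySem.Chars.split₀ a ++ PySem.Chars.split₀ b := by
  suffices h : ∀ (a cur : List Char),
      PySem.Chars.split₀.go (a ++ c :: b) cur [] =
      PySem.Chars.split₀.go a cur [] ++ PySem.Chars.split₀.go b [] [] by
    exact h a []
  intro a
  induction a with
  | nil =>
    intro cur
    simp only [List.nil_append, PySem.Chars.split₀.go, hc, if_pos]
    split
    · simp
    · rw [split0_go_acc b [] [_]]
  | cons d a ih =>
    intro cur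
    simp only [List.cons_append, PySem.Chars.split₀.go]
    split
    · split
      · exact ih []
      · rw [split0_go_acc (a ++ c :: b) [] [_], split0_go_acc a [] [_], ih []]
        simp
    · exact ih _

lemma split0_append_all_ws (s t : List Char) (h : ∀ x ∈ t, PySem.Chars.isspace x = true) :
    PySem.Chars.split₀ (s ++ t) = PySem.Chars.split₀ s := by
  cases t with
  | nil => simp
  | cons c t' =>
    rw [split0_append_ws c (h c (by simp)) s t',
        split0_all_ws t' (fun x hx => h x (by simp [hx]))]
    simp

lemma split0_lstrip (s : List Char) :
    PySem.Chars.split₀ (PySem.Chars.lstrip s) = PySem.Chars.split₀ s := by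
  induction s with
  | nil => rfl
  | cons c rest ih =>
    by_cases hc : PySem.Chars.isspace c = true
    · rw [show PySem.Chars.lstrip (c :: rest) = PySem.Chars.lstrip rest from by
        simp [PySem.Chars.lstrip, hc], ih]
      show _ = PySem.Chars.split₀.go _ [] []
      rw [PySem.Chars.split₀.go]
      simp [hc]
      rfl
    · simp [PySem.Chars.lstrip, hc]

lemma split0_rstrip (s : List Char) :
    PySem.Chars.split₀ (PySem.Chars.rstrip s) = PySem.Chars.split₀ s := by
  have hs : PySem.Chars.rstrip s ++ (s.reverse.takeWhile PySem.Chars.isspace).reverse = s := by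
    rw [PySem.Chars.rstrip]
    rw [← List.reverse_append, List.takeWhile_append_dropWhile, List.reverse_reverse]
  conv_rhs => rw [← hs]
  rw [split0_append_all_ws]
  intro x hx
  exact List.mem_takeWhile_imp (List.mem_reverse.mp hx)

lemma split0_strip (s : List Char) :
    PySem.Chars.split₀ (PySem.Chars.strip s) = PySem.Chars.split₀ s := by
  rw [PySem.Chars.strip, split0_rstrip, split0_lstrip]

lemma split0_tokens (s : List Char) :
    ∀ p ∈ PySem.Chars.split₀ s, p ≠ [] ∧ ∀ c ∈ p, PySem.Chars.isspace c = false := by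
  suffices h : ∀ (s cur : List Char) (acc : List (List Char)),
      (∀ c ∈ cur, PySem.Chars.isspace c = false) →
      (∀ p ∈ acc, p ≠ [] ∧ ∀ c ∈ p, PySem.Chars.isspace c = false) →
      ∀ p ∈ PySem.Chars.split₀.go s cur acc, p ≠ [] ∧ ∀ c ∈ p, PySem.Chars.isspace c = false by
    exact h s [] [] (by simp) (by simp)
  intro s
  induction s with
  | nil =>
    intro cur acc hcur hacc p hp
    rw [PySem.Chars.split₀.go] at hp
    split at hp
    · exact hacc p (by simpa using hp)
    · rcases (by simpa using hp : p ∈ acc ∨ p = cur.reverse) with h | h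
      · exact hacc p h
      · subst h
        refine ⟨by simpa [List.isEmpty_iff] using ‹¬cur.isEmpty = true›, ?_⟩
        intro c hc; exact hcur c (List.mem_reverse.mp hc)
  | cons c rest ih =>
    intro cur acc hcur hacc p hp
    rw [PySem.Chars.split₀.go] at hp
    by_cases hc : PySem.Chars.isspace c = true
    · rw [if_pos hc] at hp
      split at hp
      · exact ih [] acc (by simp) hacc p hp
      · refine ih [] _ (by simp) ?_ p hp
        intro q hq
        rcases List.mem_cons.mp hq with h | h
        · subst h
          refine ⟨by simpa [List.isEmpty_iff] using ‹¬cur.isEmpty = true›, ?_⟩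
          intro x hx; exact hcur x (List.mem_reverse.mp hx)
        · exact hacc q h
    · rw [if_neg hc] at hp
      refine ih (c :: cur) acc ?_ hacc p hp
      intro x hx
      rcases List.mem_cons.mp hx with h | h
      · subst h; simpa using hc
      · exact hcur x h

lemma split0_join (ps : List (List Char)) :
    PySem.Chars.split₀ (PySem.Chars.join [' '] ps) = ps.flatMap PySem.Chars.split₀ := by
  induction ps with
  | nil => rfl
  | cons p ps ih =>
    cases ps with
    | nil => simp [PySem.Chars.join_singleton]
    | cons q rest =>
      rw [PySem.Chars.join_cons_cons, List.append_assoc, List.singleton_append,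
          split0_append_ws ' ' (by decide), ih]
      simp

lemma replace_single (a b : Char) (s : List Char) :
    PySem.Chars.replace s [a] [b] = s.map (fun c => if c == a then b else c) := by
  suffices h : ∀ (fuel : Nat) (l acc : List Char), l.length ≤ fuel →
      PySem.Chars.replace.go [a] [b] fuel l acc =
      acc.reverse ++ l.map (fun c => if c == a then b else c) by
    rw [PySem.Chars.replace]
    simpa using h s.length s [] le_rfl
  intro fuel
  induction fuel with
  | zero =>
    intro l acc hl
    rw [List.length_eq_zero_iff.mp (Nat.le_zero.mp hl)]
    rw [PySem.Chars.replace.go]; simp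
  | succ n ih =>
    intro l acc hl
    cases l with
    | nil =>
      rw [PySem.Chars.replace.go]
      simp
      omega
    | cons c t =>
      rw [PySem.Chars.replace.go]
      by_cases hac : a = c
      · subst hac
        rw [if_pos (by simp [List.isPrefixOf])]
        rw [show List.drop [a].length (a :: t) = t from rfl,
            show [b].reverse ++ acc = b :: acc from rfl]
        rw [ih t (b :: acc) (by simpa using hl)]
        simp
      · rw [if_neg (by simp [List.isPrefixOf]; exact fun h => absurd h hac)]
        rw [ih t (c :: acc) (by simpa using hl)]
        simp only [List.map_cons, List.reverse_cons, List.append_assoc, List.singleton_append]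
        congr 1
        simp
        exact fun h => absurd h.symm hac

lemma splitlines_go_chars (isB : Char → Bool) (s cur : List Char) (acc : List (List Char)) :
    ∀ p ∈ PySem.Chars.splitlines.go isB s cur acc, ∀ c ∈ p,
        isB c = false ∨ c ∈ cur ∨ ∃ q ∈ acc, c ∈ q := by
  fun_induction PySem.Chars.splitlines.go isB s cur acc with
  | case1 cur acc h =>
    intro p hp c hc
    right; right; exact ⟨p, (by simpa using hp), hc⟩
  | case2 cur acc h =>
    intro p hp c hc
    rcases (by simpa using hp : p ∈ acc ∨ p = cur.reverse) with h' | h'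
    · right; right; exact ⟨p, h', hc⟩
    · subst h'; right; left; exact List.mem_reverse.mp hc
  | case3 rest cur acc ih =>
    intro p hp c hc
    rcases ih p hp c hc with h' | h' | ⟨q, hq, hcq⟩
    · exact Or.inl h'
    · simp at h'
    · rcases List.mem_cons.mp hq with h' | h'
      · subst h'; right; left; exact List.mem_reverse.mp hcq
      · right; right; exact ⟨q, h', hcq⟩
  | case4 d rest cur acc hne hB ih =>
    intro p hp c hc
    rcases ih p hp c hc with h' | h' | ⟨q, hq, hcq⟩
    · exact Or.inl h'
    · simp at h'
    · rcases List.mem_cons.mp hq with h' | h'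
      · subst h'; right; left; exact List.mem_reverse.mp hcq
      · right; right; exact ⟨q, h', hcq⟩
  | case5 d rest cur acc hne hB ih =>
    intro p hp c hc
    rcases ih p hp c hc with h' | h' | hq
    · exact Or.inl h'
    · rcases List.mem_cons.mp h' with h'' | h''
      · subst h''; left; simpa using hB
      · right; left; exact h''
    · right; right; exact hq

lemma splitlines_no_newline (s : List Char) :
    ∀ p ∈ PySem.Chars.splitlines s, ∀ c ∈ p, c ≠ '\n' := by
  intro p hp c hc hcn
  rw [PySem.Chars.splitlines] at hp
  have := splitlines_go_chars _ s [] [] p hp c hc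
  rcases this with h | h | ⟨q, hq, _⟩
  · subst hcn; exact absurd h (by decide)
  · simp at h
  · simp at hq

lemma mem_strip (s : List Char) (c : Char) (h : c ∈ PySem.Chars.strip s) : c ∈ s := by
  rw [PySem.Chars.strip, PySem.Chars.rstrip, PySem.Chars.lstrip] at h
  have h1 := (List.dropWhile_sublist _ (l := (List.dropWhile PySem.Chars.isspace s).reverse)).mem
      (List.mem_reverse.mp h)
  have h2 := (List.dropWhile_sublist (p := PySem.Chars.isspace) (l := s)).mem
      (List.mem_reverse.mp (by simpa using h1))
  exact h2

lemma mem_removeprefix (s p : List Char) (c : Char) (h : c ∈ pvRemoveprefix s p) : c ∈ s := by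
  rw [pvRemoveprefix] at h
  split at h
  · exact List.mem_of_mem_drop h
  · exact h

lemma join_append_singleton (c : Char) (w : List Char) (ws : List (List Char)) (h : ws ≠ []) :
    PySem.Chars.join [c] (ws ++ [w]) = PySem.Chars.join [c] ws ++ c :: w := by
  induction ws with
  | nil => exact absurd rfl h
  | cons x ws ih =>
    cases ws with
    | nil => simp [PySem.Chars.join_cons_cons, PySem.Chars.join_singleton]
    | cons y rest =>
      simp only [List.cons_append] at ih ⊢
      rw [PySem.Chars.join_cons_cons, ih (by simp), PySem.Chars.join_cons_cons]
      simp

lemma lstrip_cons_nonspace (c : Char) (t : List Char) (hc : PySem.Chars.isspace c = false) :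
    PySem.Chars.lstrip (c :: t) = c :: t := by
  simp [PySem.Chars.lstrip, hc]

lemma rstrip_append (s w : List Char) (hw : w ≠ [])
    (h : ∀ c ∈ w, PySem.Chars.isspace c = false) :
    PySem.Chars.rstrip (s ++ w) = s ++ w := by
  rw [PySem.Chars.rstrip, List.reverse_append]
  cases hwr : w.reverse with
  | nil => exact absurd (by simpa using hwr) hw
  | cons c t =>
    have hcw : c ∈ w := by rw [← List.mem_reverse, hwr]; simp
    have hc : PySem.Chars.isspace c = false := h c hcw
    rw [List.cons_append, List.dropWhile_cons, if_neg (by simp [hc]), ← List.cons_append,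
        ← hwr, List.reverse_append, List.reverse_reverse, List.reverse_reverse]

lemma strip_join_tokens (ws : List (List Char))
    (h : ∀ w ∈ ws, w ≠ [] ∧ ∀ c ∈ w, PySem.Chars.isspace c = false) :
    PySem.Chars.strip (PySem.Chars.join [' '] ws) = PySem.Chars.join [' '] ws := by
  cases ws with
  | nil => rfl
  | cons w ws' =>
    have hls : PySem.Chars.lstrip (PySem.Chars.join [' '] (w :: ws')) =
        PySem.Chars.join [' '] (w :: ws') := by
      rcases h w (by simp) with ⟨hne, hch⟩
      cases w with
      | nil => exact absurd rfl hne
      | cons c w' =>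
        have hc : PySem.Chars.isspace c = false := hch c (by simp)
        cases ws' with
        | nil => rw [PySem.Chars.join_singleton]; exact lstrip_cons_nonspace c w' hc
        | cons q rest =>
          rw [PySem.Chars.join_cons_cons, List.cons_append, List.cons_append]
          exact lstrip_cons_nonspace c _ hc
    have hrs : PySem.Chars.rstrip (PySem.Chars.join [' '] (w :: ws')) =
        PySem.Chars.join [' '] (w :: ws') := by
      rcases List.eq_nil_or_concat (w :: ws') with h' | ⟨l, a, h'⟩
      · simp at h'
      · rw [h', List.concat_eq_append]
        have ha := h a (by rw [h']; simp)
        cases l with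
        | nil =>
          simpa [PySem.Chars.join_singleton] using rstrip_append [] a ha.1 ha.2
        | cons x l' =>
          rw [join_append_singleton ' ' a _ (by simp),
              show PySem.Chars.join [' '] (x :: l') ++ ' ' :: a =
                (PySem.Chars.join [' '] (x :: l') ++ [' ']) ++ a from by simp]
          rw [rstrip_append _ a ha.1 ha.2]
    rw [PySem.Chars.strip, hls, hrs]

lemma replace_newline_join (ps : List (List Char))
    (h : ∀ p ∈ ps, ∀ c ∈ p, c ≠ '\n') :
    PySem.Chars.replace (PySem.Chars.join ['\n'] ps) ['\n'] [' '] =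
    PySem.Chars.join [' '] ps := by
  rw [replace_single]
  induction ps with
  | nil => rfl
  | cons p ps ih =>
    have hp : p.map (fun c => if c == '\n' then ' ' else c) = p := by
      rw [show p = p.map id from (List.map_id p).symm, List.map_map]
      apply List.map_congr_left
      intro c hc
      simp [h p (by simp) c (by simpa using hc)]
    cases ps with
    | nil => rw [PySem.Chars.join_singleton, PySem.Chars.join_singleton, hp]
    | cons q rest =>
      rw [PySem.Chars.join_cons_cons, PySem.Chars.join_cons_cons]
      rw [List.map_append, List.map_append, hp,
          ih (fun r hr => h r (by simp [hr]))]
      rfl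

lemma flatMap_ite_filter {α β : Type} (p : α → Bool) (g : α → List β) (l : List α) :
    l.flatMap (fun x => if p x = true then [] else g x) =
    (l.filter (fun x => !p x)).flatMap g := by
  induction l with
  | nil => rfl
  | cons x l ih =>
    by_cases hx : p x = true <;> simp [hx, ih]

-- A's value, normalised to the per-line tokens joined by single blanks
lemma A_norm (block : String) :
    clean_block block =
    String.mk (PySem.Chars.join [' '] ((PySem.Chars.splitlines block.toList).flatMap tokA)) := by
  rw [clean_block]
  set L0 := PySem.Chars.splitlines block.toList with hL0
  set g := fun l => pvRemoveprefix (pvRemoveprefix l ['-', ' ']) ['*', ' '] with hg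
  have hclean : (L0.map PySem.Chars.strip).foldl
      (fun acc line => if line.isEmpty then acc else acc ++ [PySem.Chars.strip (g line)]) [] =
      ((L0.map PySem.Chars.strip).filter (fun l => !l.isEmpty)).map
        (fun l => PySem.Chars.strip (g l)) := by
    rw [show (fun (acc : List (List Char)) line =>
          if line.isEmpty = true then acc else acc ++ [PySem.Chars.strip (g line)]) =
        (fun acc line => if (!line.isEmpty) = true then acc ++ [PySem.Chars.strip (g line)]
          else acc) from by
      funext acc line
      by_cases h : line.isEmpty = true <;> simp [h]]
    rw [PySem.List.foldl_append_if]
    simp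
  rw [hclean]
  set cleaned := ((L0.map PySem.Chars.strip).filter (fun l => !l.isEmpty)).map
    (fun l => PySem.Chars.strip (g l)) with hcl
  have hnn : ∀ p ∈ cleaned, ∀ c ∈ p, c ≠ '\n' := by
    intro p hp c hc
    rw [hcl] at hp
    rcases List.mem_map.mp hp with ⟨l, hl, rfl⟩
    rcases List.mem_map.mp (List.mem_of_mem_filter hl) with ⟨l0, hl0, rfl⟩
    have hc1 := mem_strip _ _ hc
    have hc2 := mem_removeprefix _ _ _ (mem_removeprefix _ _ _ hc1)
    have hc3 := mem_strip _ _ hc2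
    exact splitlines_no_newline block.toList l0 hl0 c hc3
  rw [pvCompactText, replace_newline_join cleaned hnn, split0_join]
  have htok := split0_tokens (PySem.Chars.join [' '] cleaned)
  rw [split0_join] at htok
  rw [List.filter_eq_self.mpr (fun w hw => by simpa using (htok w hw).1)]
  rw [strip_join_tokens _ htok]
  rw [hcl, List.flatMap_map]
  rw [show (fun a => PySem.Chars.split₀ (PySem.Chars.strip (g a))) =
      (fun l => PySem.Chars.split₀ (g l)) from funext fun l => split0_strip (g l)]
  rw [← flatMap_ite_filter, List.flatMap_map]
  have hfun : (fun a => if (PySem.Chars.strip a).isEmpty = true then []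
        else PySem.Chars.split₀ (g (PySem.Chars.strip a))) = tokA := by
    funext l
    by_cases h : (PySem.Chars.strip l).isEmpty = true
    · rw [if_pos h, tokA, List.isEmpty_iff.mp h]
      rfl
    · rw [if_neg h, tokA, hg]
  rw [hfun]

-- ===== B-side bridge =====

-- the line-break predicate splitlines uses, as a named function
def pvSLB (c : Char) : Bool :=
  decide (c.toNat = 10) || decide (c.toNat = 13) || decide (c.toNat = 11) || decide (c.toNat = 12) ||
  decide (c.toNat = 28) || decide (c.toNat = 29) || decide (c.toNat = 30) || decide (c.toNat = 133) ||
  decide (c.toNat = 8232) || decide (c.toNat = 8233)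

-- splitlines.go without the accumulator
def slGoSpec (isB : Char → Bool) : List Char → List Char → List (List Char)
  | [], cur => if cur.isEmpty then [] else [cur.reverse]
  | '\x0d' :: '\n' :: rest, cur => cur.reverse :: slGoSpec isB rest []
  | c :: rest, cur =>
    if isB c then cur.reverse :: slGoSpec isB rest [] else slGoSpec isB rest (c :: cur)

lemma sl_go_spec (isB : Char → Bool) (s cur : List Char) (acc : List (List Char)) :
    PySem.Chars.splitlines.go isB s cur acc = acc.reverse ++ slGoSpec isB s cur := by
  fun_induction PySem.Chars.splitlines.go isB s cur acc with
  | case1 cur acc h => simp [slGoSpec, h]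
  | case2 cur acc h => simp [slGoSpec, h]
  | case3 rest cur acc ih => rw [ih]; simp [slGoSpec]
  | case4 c rest cur acc hne hB ih =>
    rw [ih, slGoSpec.eq_3 isB cur c rest (by intro r h1 h2; exact hne r h1 h2), if_pos hB]
    simp
  | case5 c rest cur acc hne hB ih =>
    rw [ih, slGoSpec.eq_3 isB cur c rest (by intro r h1 h2; exact hne r h1 h2), if_neg (by simp [hB])]

lemma splitlines_eq_spec (s : List Char) :
    PySem.Chars.splitlines s = slGoSpec pvSLB s [] := by
  have h := sl_go_spec pvSLB s [] []
  simpa [PySem.Chars.splitlines, pvSLB] using h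

lemma char_toNat_inj {c d : Char} (h : c.toNat = d.toNat) : c = d :=
  Char.ext (UInt32.toNat_inj.mp h)

lemma char_beq_toNat (c d : Char) : (c == d) = decide (c.toNat = d.toNat) := by
  by_cases h : c = d
  · subst h; simp
  · have h2 : ¬ c.toNat = d.toNat := fun hn => h (char_toNat_inj hn)
    simp [h, h2]

lemma break_eq_toNat (c : Char) :
    (c == '\n' || c == '\r') = (decide (c.toNat = 10) || decide (c.toNat = 13)) := by
  rw [char_beq_toNat c '\n', char_beq_toNat c '\r',
      show ('\n').toNat = 10 from rfl, show ('\r').toNat = 13 from rfl]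

lemma pvSLB_dom (c : Char) (h : pvDomChar c = true) : pvSLB c = (c == '\n' || c == '\r') := by
  rw [break_eq_toNat]
  simp only [pvDomChar, Bool.or_eq_true, Bool.and_eq_true, decide_eq_true_eq, beq_iff_eq] at h
  rw [pvSLB]
  apply Bool.coe_iff_coe.mp
  simp only [Bool.or_eq_true, decide_eq_true_eq]
  omega

lemma ws_eq (c : Char) (h : pvDomChar c = true) (hb : (c == '\n' || c == '\r') = false) :
    PySem.Chars.isspace c = bIsWS c := by
  rw [break_eq_toNat] at hb
  simp only [Bool.or_eq_false_iff, decide_eq_false_iff_not] at hb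
  simp only [pvDomChar, Bool.or_eq_true, Bool.and_eq_true, decide_eq_true_eq, beq_iff_eq] at h
  rw [PySem.Chars.isspace, bIsWS, char_beq_toNat c ' ', char_beq_toNat c '\t',
      show (' ').toNat = 32 from rfl, show ('\t').toNat = 9 from rfl]
  apply Bool.coe_iff_coe.mp
  simp only [Bool.or_eq_true, Bool.and_eq_true, decide_eq_true_eq]
  omega

lemma dropWhile_congr' (p q : Char → Bool) (l : List Char) (h : ∀ a ∈ l, p a = q a) :
    l.dropWhile p = l.dropWhile q := by
  induction l with
  | nil => rfl
  | cons c t ih =>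
    rw [List.dropWhile_cons, List.dropWhile_cons, h c (by simp)]
    split
    · exact ih (fun a ha => h a (by simp [ha]))
    · rfl

lemma takeWhile_congr' (p q : Char → Bool) (l : List Char) (h : ∀ a ∈ l, p a = q a) :
    l.takeWhile p = l.takeWhile q := by
  induction l with
  | nil => rfl
  | cons c t ih =>
    rw [List.takeWhile_cons, List.takeWhile_cons, h c (by simp)]
    split
    · rw [ih (fun a ha => h a (by simp [ha]))]
    · rfl

lemma bWord_eq (l : List Char) :
    bWord l = (l.takeWhile (fun c => !bIsWS c), l.dropWhile (fun c => !bIsWS c)) := by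
  induction l with
  | nil => rfl
  | cons c t ih =>
    rw [bWord]
    by_cases hc : bIsWS c = true
    · simp [hc]
    · simp only [Bool.not_eq_true] at hc
      simp [hc, ih]

lemma split0_cons_ws (c : Char) (t : List Char) (hc : PySem.Chars.isspace c = true) :
    PySem.Chars.split₀ (c :: t) = PySem.Chars.split₀ t := by
  show PySem.Chars.split₀.go _ [] [] = _
  rw [PySem.Chars.split₀.go]
  simp [hc]
  rfl

lemma split0_go_word (s : List Char) :
    ∀ cur : List Char, cur ≠ [] →
    PySem.Chars.split₀.go s cur [] =
      (cur.reverse ++ s.takeWhile (fun x => !PySem.Chars.isspace x)) ::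
        PySem.Chars.split₀ (s.dropWhile (fun x => !PySem.Chars.isspace x)) := by
  induction s with
  | nil =>
    intro cur hcur
    rw [PySem.Chars.split₀.go]
    simp [List.isEmpty_iff, hcur]
    rfl
  | cons c t ih =>
    intro cur hcur
    rw [PySem.Chars.split₀.go]
    by_cases hc : PySem.Chars.isspace c = true
    · rw [if_pos hc, if_neg (by simpa [List.isEmpty_iff] using hcur)]
      rw [split0_go_acc t [] [cur.reverse]]
      rw [List.takeWhile_cons, List.dropWhile_cons]
      simp [hc, split0_cons_ws c t hc]
      rfl
    · rw [if_neg hc, ih (c :: cur) (by simp)]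
      rw [List.takeWhile_cons, List.dropWhile_cons]
      simp [hc]

lemma split0_cons_nonws (c : Char) (t : List Char) (hc : PySem.Chars.isspace c = false) :
    PySem.Chars.split₀ (c :: t) =
      (c :: t.takeWhile (fun x => !PySem.Chars.isspace x)) ::
        PySem.Chars.split₀ (t.dropWhile (fun x => !PySem.Chars.isspace x)) := by
  show PySem.Chars.split₀.go _ [] [] = _
  rw [PySem.Chars.split₀.go, if_neg (by simp [hc]), split0_go_word t [c] (by simp)]
  rfl

theorem tok_eq : ∀ (l : List Char), (∀ c ∈ l, PySem.Chars.isspace c = bIsWS c) →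
    bTok l = PySem.Chars.split₀ l
  | [], _ => by rw [bTok]; rfl
  | c :: t, h => by
    rw [bTok]
    have hc := h c (by simp)
    by_cases hw : bIsWS c = true
    · rw [if_pos hw, split0_cons_ws c t (hc.trans hw),
        tok_eq t (fun x hx => h x (by simp [hx]))]
    · simp only [Bool.not_eq_true] at hw
      have hsub : ∀ x ∈ t.dropWhile (fun c => !bIsWS c), x ∈ t :=
        fun x hx => (List.dropWhile_sublist _).mem hx
      rw [if_neg (by simp [hw]), split0_cons_nonws c t (hc.trans hw), bWord_eq,
          takeWhile_congr' (fun x => !PySem.Chars.isspace x) (fun x => !bIsWS x) t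
            (fun a ha => by simp [h a (List.mem_cons_of_mem c ha)]),
          dropWhile_congr' (fun x => !PySem.Chars.isspace x) (fun x => !bIsWS x) t
            (fun a ha => by simp [h a (List.mem_cons_of_mem c ha)]),
          tok_eq (t.dropWhile (fun c => !bIsWS c)) (fun x hx => h x (by simp [hsub x hx]))]
termination_by l => l.length
decreasing_by
  · simp only [List.length_cons]
    omega
  · have := (List.dropWhile_sublist (l := t) (p := fun c => !bIsWS c)).length_le
    simp only [List.length_cons]
    omega

lemma prefix_eq (m : Char) (l : List Char) : bDropBullet m l = pvRemoveprefix l [m, ' '] := by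
  match l with
  | [] => rfl
  | [a] => simp [bDropBullet, pvRemoveprefix, PySem.Chars.startswith, List.isPrefixOf]
  | a :: b :: t =>
    rw [bDropBullet, pvRemoveprefix]
    have hsw : PySem.Chars.startswith (a :: b :: t) [m, ' '] = (a == m && b == ' ') := by
      show (m == a && (' ' == b && List.isPrefixOf [] t)) = (a == m && b == ' ')
      rw [show List.isPrefixOf ([] : List Char) t = true from rfl, Bool.and_true,
          Bool.beq_comm (a := m) (b := a), Bool.beq_comm (a := ' ') (b := b)]
    rw [hsw]
    by_cases hm : (a == m && b == ' ') = true
    · rw [if_pos hm, if_pos hm]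
      rfl
    · rw [if_neg hm, if_neg hm]

lemma strip_eq (l : List Char) (h : ∀ c ∈ l, PySem.Chars.isspace c = bIsWS c) :
    bRstrip (bLstrip l) = PySem.Chars.strip l := by
  rw [bLstrip, bRstrip, PySem.Chars.strip, PySem.Chars.lstrip, PySem.Chars.rstrip]
  rw [dropWhile_congr' bIsWS PySem.Chars.isspace l (fun a ha => (h a ha).symm)]
  congr 1
  apply dropWhile_congr'
  intro a ha
  exact (h a ((List.dropWhile_sublist _).mem (List.mem_reverse.mp ha))).symm

lemma line_eq (l : List Char)
    (h : ∀ c ∈ l, pvDomChar c = true ∧ (c == '\n' || c == '\r') = false) :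
    bLine l = tokA l := by
  have hws : ∀ c ∈ l, PySem.Chars.isspace c = bIsWS c :=
    fun c hc => ws_eq c (h c hc).1 (h c hc).2
  rw [bLine, strip_eq l hws, prefix_eq, prefix_eq, tokA]
  apply tok_eq
  intro c hc
  exact hws c (mem_strip _ _ (mem_removeprefix _ _ _ (mem_removeprefix _ _ _ hc)))

lemma bLine_nil : bLine [] = [] := by
  rw [bLine, show bDropBullet '*' (bDropBullet '-' (bRstrip (bLstrip []))) = [] from rfl, bTok]

lemma bGo_unfold (s : List Char) :
    bGo s = bLine (bLineSplit s).1 ++ bGo (bLineSplit s).2 := by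
  cases s with
  | nil => simp [bGo, bLineSplit, bLine_nil]
  | cons c t => rw [bGo]

lemma spec_flat_step (isB : Char → Bool) (c : Char) (t cur : List Char)
    (hbk : isB c = (c == '\n' || c == '\r'))
    (heq : slGoSpec isB (c :: t) cur =
      if isB c then cur.reverse :: slGoSpec isB t [] else slGoSpec isB t (c :: cur))
    (hrec1 : (slGoSpec isB t []).flatMap tokA =
      bLine (bLineSplit t).1 ++ bGo (bLineSplit t).2)
    (hrec2 : isB c = false → (slGoSpec isB t (c :: cur)).flatMap tokA =
      bLine ((c :: cur).reverse ++ (bLineSplit t).1) ++ bGo (bLineSplit t).2)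
    (hcur : ∀ x ∈ cur, pvDomChar x = true ∧ (x == '\n' || x == '\r') = false) :
    (slGoSpec isB (c :: t) cur).flatMap tokA =
      bLine (cur.reverse ++ (bLineSplit (c :: t)).1) ++ bGo (bLineSplit (c :: t)).2 := by
  by_cases hisB : isB c = true
  · rw [heq, if_pos hisB, List.flatMap_cons, hrec1,
        ← line_eq cur.reverse (fun x hx => hcur x (List.mem_reverse.mp hx)),
        show bLineSplit (c :: t) = ([], t) from by
          simp only [bLineSplit]
          rw [if_pos (hbk ▸ hisB)],
        ← bGo_unfold t]
    simp
  · simp only [Bool.not_eq_true] at hisB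
    rw [heq, if_neg (by simp [hisB]), hrec2 hisB,
        show bLineSplit (c :: t) = (c :: (bLineSplit t).1, (bLineSplit t).2) from by
          simp only [bLineSplit]
          rw [if_neg (by simp [hbk ▸ hisB])]]
    simp

theorem spec_flat (isB : Char → Bool)
    (hB : ∀ c, pvDomChar c = true → isB c = (c == '\n' || c == '\r')) :
    ∀ (s cur : List Char), (∀ c ∈ s, pvDomChar c = true) →
    (∀ c ∈ cur, pvDomChar c = true ∧ (c == '\n' || c == '\r') = false) →
    (slGoSpec isB s cur).flatMap tokA =
      bLine (cur.reverse ++ (bLineSplit s).1) ++ bGo (bLineSplit s).2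
  | [], cur, hs, hcur => by
    rw [slGoSpec, show bLineSplit [] = ([], []) from rfl]
    by_cases hc : cur.isEmpty = true
    · rw [if_pos hc, List.isEmpty_iff.mp hc, show bGo [] = [] from by rw [bGo]]
      simp [bLine_nil]
    · rw [if_neg hc, show bGo [] = [] from by rw [bGo], List.flatMap_cons, List.flatMap_nil,
          ← line_eq cur.reverse (fun x hx => hcur x (List.mem_reverse.mp hx))]
      simp
  | c :: t, cur, hs, hcur => by
    have hdc : pvDomChar c = true := hs c (by simp)
    have hbk := hB c hdc
    have hcons : isB c = false →
        ∀ x ∈ c :: cur, pvDomChar x = true ∧ (x == '\n' || x == '\r') = false := by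
      intro hisB x hx
      rcases List.mem_cons.mp hx with rfl | hx'
      · exact ⟨hdc, by rw [← hbk]; exact hisB⟩
      · exact hcur x hx'
    match t, hs with
    | [], hs =>
      exact spec_flat_step isB c [] cur hbk
        (slGoSpec.eq_3 isB cur c [] (by intro r _ h2; cases h2))
        (spec_flat isB hB [] [] (by simp) (by simp))
        (fun hisB => spec_flat isB hB [] (c :: cur) (by simp) (hcons hisB))
        hcur
    | d :: t2, hs =>
      by_cases hrn : c = '\x0d' ∧ d = '\n'
      · obtain ⟨rfl, rfl⟩ := hrn
        rw [slGoSpec, List.flatMap_cons,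
            ← line_eq cur.reverse (fun x hx => hcur x (List.mem_reverse.mp hx)),
            spec_flat isB hB t2 [] (fun x hx => hs x (by simp [hx])) (by simp),
            show bLineSplit ('\x0d' :: '\n' :: t2) = ([], '\n' :: t2) from by
              simp [bLineSplit],
            show bGo ('\n' :: t2) = bGo t2 from by
              rw [bGo_unfold ('\n' :: t2),
                  show bLineSplit ('\n' :: t2) = ([], t2) from by simp [bLineSplit]]
              simp [bLine_nil]]
        simp only [List.reverse_nil, List.nil_append]
        rw [← bGo_unfold t2]
        simp
      · have hne : ∀ (r : List Char), c = '\x0d' → d :: t2 = '\n' :: r → False := by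
          intro r h1 h2
          exact hrn ⟨h1, (List.cons.injEq d t2 '\n' r).mp h2 |>.1⟩
        exact spec_flat_step isB c (d :: t2) cur hbk
          (slGoSpec.eq_3 isB cur c (d :: t2) hne)
          (spec_flat isB hB (d :: t2) [] (fun x hx => hs x (by simp [hx])) (by simp))
          (fun hisB => spec_flat isB hB (d :: t2) (c :: cur)
            (fun x hx => hs x (by simp [hx])) (hcons hisB))
          hcur
termination_by s _ _ _ => s.length
decreasing_by all_goals simp only [List.length_cons]; omega

lemma B_norm (block : String) (h : ∀ c ∈ block.toList, pvDomChar c = true) :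
    bGo block.toList = (PySem.Chars.splitlines block.toList).flatMap tokA := by
  rw [splitlines_eq_spec, spec_flat pvSLB pvSLB_dom block.toList [] h (by simp),
      List.reverse_nil, List.nil_append, ← bGo_unfold]

theorem clean_block_spec : Claim_equal_clean_block := by
  intro block hdom
  show clean_block block = clean_block_alt block
  have hall : ∀ c ∈ block.toList, pvDomChar c = true := by
    have hd : block.toList.all pvDomChar = true := hdom
    exact fun c hc => List.all_eq_true.mp hd c hc
  rw [A_norm, clean_block_alt, B_norm block hall]
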